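-- pv_equiv track=rewrite | github.com/occidere/leetcode | Algorithms/1190_Reverse_Substrings_Between_Each_Pair_of_Parentheses/solution.py | pops
-- ===== SOURCE A (Python) =====
-- from typing import List
--
-- def pops(stk: List[str]) -> str:
--     s: List[str] = []
--     while stk:
--         top = stk.pop()
--         if top != '(':
--             s.append(top)
--         else:
--             break
--     return ''.join(s)[::-1]
-- ===== SOURCE B (Python) =====
-- def pops(stk):
--     # NOTE: like A, this mutates stk (removes the last '(' and everything after it).
--     try:
--         i = len(stk) - 1 - stk[::-1].index('(')
--     except ValueError:
--         i = -1
--     out = ''.join(t[::-1] for t in stk[i + 1:])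
--     if i >= 0:
--         del stk[i:]
--     else:
--         stk.clear()
--     return out
-- ===== Notes on version B (the rewrite author's own statement) =====
-- stated objective: alternative
-- what changed: Replaces A's pop-append loop plus final string reversal by locating the last '(' via reversed index(), slicing the tail in original order and joining the element-wise reversals (index-and-slice decomposition, no pop loop).
import Mathlib
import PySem

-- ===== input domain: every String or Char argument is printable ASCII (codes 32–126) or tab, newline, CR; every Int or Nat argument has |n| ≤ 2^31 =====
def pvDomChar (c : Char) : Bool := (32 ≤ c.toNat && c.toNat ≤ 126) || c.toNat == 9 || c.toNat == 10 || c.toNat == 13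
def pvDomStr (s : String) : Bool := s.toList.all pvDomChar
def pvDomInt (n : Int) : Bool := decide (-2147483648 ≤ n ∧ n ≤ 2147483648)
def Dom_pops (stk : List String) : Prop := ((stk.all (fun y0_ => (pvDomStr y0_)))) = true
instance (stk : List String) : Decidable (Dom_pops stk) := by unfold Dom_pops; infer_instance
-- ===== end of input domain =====

-- B replaces A's pop-until-'('-then-reverse loop by locating the last '(' with index?/slice
-- (objective: alternative decomposition). Both Pythons mutate stk identically; only the
-- RETURN value is what the theorems below are about.


-- ===== PORT A =====
-- the 'while stk: top = stk.pop(); …' loop: popping from the end = structural recursion on stk.reverse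
def popsLoopA : List String → List String → List String
  | [], s => s
  | top :: rest, s => if top ≠ "(" then popsLoopA rest (s ++ [top]) else s

-- ''.join(s)[::-1]; slice? with the literal step -1 never raises, so .getD "" is its total form
def pops (stk : List String) : String :=
  (PySem.Str.slice? (PySem.Str.join "" (popsLoopA stk.reverse [])) none none (-1)).getD ""

-- ===== PORT B =====
-- t[::-1] (never raises: step -1)
def revStr (t : String) : String :=
  (PySem.Str.slice? t none none (-1)).getD ""

-- try: i = len(stk)-1 - stk[::-1].index('(') / except ValueError: i = -1;
-- out = ''.join(t[::-1] for t in stk[i+1:])  (the ValueError branch gives stk[0:] = stk)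
def pops_alt (stk : List String) : String :=
  match PySem.List.index? stk.reverse "(" with
  | some j =>
      -- i = len(stk) - 1 - j; the slice stk[i+1:]
      PySem.Str.join "" ((PySem.List.slice stk (some (PySem.List.len stk - 1 - (j : Int) + 1)) none).map revStr)
  | none => PySem.Str.join "" (stk.map revStr)

-- ===== PRECONDITION & SPEC =====
def Spec_pops (stk : List String) (out : String) : Prop := out = pops_alt stk
instance (stk : List String) (out : String) : Decidable (Spec_pops stk out) := by unfold Spec_pops; infer_instance

-- ===== CLAIM (what is proved, stated in full; the proofs are below) =====
def Claim_equal_pops : Prop := ∀ (stk : List String), Dom_pops stk → Spec_pops stk (pops stk)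

-- ===== LEMMAS AND PROOFS =====
theorem popsLoopA_acc (l s : List String) :
    popsLoopA l s = s ++ l.takeWhile (fun t => t != "(") := by
  induction l generalizing s with
  | nil => simp [popsLoopA]
  | cons top rest ih =>
      by_cases h : top = "("
      · simp [popsLoopA, h]
      · simp [popsLoopA, h, ih]

theorem join_empty_eq_flatten (w : List (List Char)) : PySem.Chars.join [] w = w.flatten := by
  induction w with
  | nil => rfl
  | cons a t ih => cases t <;> simp_all [PySem.Chars.join_cons_cons, PySem.Chars.join_singleton]

theorem revStr_eq (t : String) : revStr t = String.ofList t.toList.reverse := by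
  simp [revStr, PySem.Str.slice?_none_none_neg_one]

-- reversing the characters of ''.join(w) = ''.join of the element-wise reversals of w reversed
theorem rev_join (w : List String) :
    String.ofList ((PySem.Str.join "" w).toList.reverse)
      = PySem.Str.join "" (w.reverse.map revStr) := by
  apply String.toList_inj.mp
  simp [join_empty_eq_flatten, revStr_eq, List.reverse_flatten,
        Function.comp_def, List.map_reverse]

theorem takeWhile_break (pre suf : List String) (h : "(" ∉ pre) :
    (pre ++ "(" :: suf).takeWhile (fun t => t != "(") = pre := by
  have hpre : pre.takeWhile (fun t => t != "(") = pre := by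
    rw [List.takeWhile_eq_self_iff]
    intro x hx
    simp only [bne_iff_ne, ne_eq]
    intro e; exact h (e ▸ hx)
  rw [List.takeWhile_append, hpre]
  simp

theorem takeWhile_all (l : List String) (h : "(" ∉ l) :
    l.takeWhile (fun t => t != "(") = l := by
  rw [List.takeWhile_eq_self_iff]
  intro x hx
  simp only [bne_iff_ne, ne_eq]
  intro e; exact h (e ▸ hx)

-- ===== VERDICT (by name: the statement is the Claim_ definition above) =====
theorem pops_spec : Claim_equal_pops := by
  intro stk _
  show pops stk = pops_alt stk
  rw [pops, PySem.Str.slice?_none_none_neg_one, Option.getD_some, popsLoopA_acc,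
      List.nil_append]
  cases hidx : PySem.List.index? stk.reverse "(" with
  | none =>
      simp only [pops_alt, hidx]
      have hnot : "(" ∉ stk.reverse := by rw [← PySem.List.index?_eq_none_iff]; exact hidx
      rw [takeWhile_all _ hnot, rev_join, List.reverse_reverse]
  | some j =>
      simp only [pops_alt, hidx]
      have h2 := hidx
      rw [PySem.List.index?_eq_some_iff] at h2
      obtain ⟨pre, suf, hdec, hlen, hmem⟩ := h2
      have hstk : stk = suf.reverse ++ "(" :: pre.reverse := by
        have := congrArg List.reverse hdec
        simpa using this
      rw [hdec, takeWhile_break _ _ hmem, rev_join]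
      have hlenstk : stk.length = suf.length + 1 + pre.length := by
        rw [hstk]; simp; omega
      have hi : PySem.List.len stk - 1 - (j : Int) + 1 = ((suf.length + 1 : Nat) : Int) := by
        rw [PySem.List.len_eq]
        subst hlen
        push_cast
        omega
      rw [hi, PySem.List.slice_from_natCast]
      have hdrop : stk.drop (suf.length + 1) = pre.reverse := by
        rw [hstk,
            show suf.reverse ++ "(" :: pre.reverse = (suf.reverse ++ ["("]) ++ pre.reverse by simp,
            show suf.length + 1 = (suf.reverse ++ ["("]).length by simp]
        exact List.drop_left
      rw [hdrop]
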